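-- pv_equiv track=rewrite | github.com/Vatsu04/Trabalho-Desenvolvimento-de-Software | preco.py | validar_entrada
-- ===== SOURCE A (Python) =====
-- def validar_entrada(input):
--     """
--     Valida a entrada para permitir apenas números e pontos.
--     """
--     if input.isdigit():
--         return True
--     elif input.count('.') == 1 and all(char.isdigit() or char == '.' for char in input):
--         return True
--     elif input == "":
--         return True
--     else:
--         return False
-- ===== SOURCE B (Python) =====
-- def validar_entrada(input):
--     """
--     Valida a entrada para permitir apenas numeros e pontos,
--     em uma unica passada sobre a string.
--     """
--     dots = 0
--     all_digit = True
--     all_digit_or_dot = True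
--     for ch in input:
--         if ch == '.':
--             dots += 1
--             all_digit = False
--         elif ch.isdigit():
--             pass
--         else:
--             all_digit = False
--             all_digit_or_dot = False
--     if input == "":
--         return True
--     if all_digit:
--         return True
--     return dots == 1 and all_digit_or_dot
-- ===== Notes on version B (the rewrite author's own statement) =====
-- stated objective: alternative
-- what changed: B replaces A's three separate library scans (isdigit, dot count, all(...) generator) with a single pass maintaining a dot counter and two running flags, deciding at the end.
import Mathlib
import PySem

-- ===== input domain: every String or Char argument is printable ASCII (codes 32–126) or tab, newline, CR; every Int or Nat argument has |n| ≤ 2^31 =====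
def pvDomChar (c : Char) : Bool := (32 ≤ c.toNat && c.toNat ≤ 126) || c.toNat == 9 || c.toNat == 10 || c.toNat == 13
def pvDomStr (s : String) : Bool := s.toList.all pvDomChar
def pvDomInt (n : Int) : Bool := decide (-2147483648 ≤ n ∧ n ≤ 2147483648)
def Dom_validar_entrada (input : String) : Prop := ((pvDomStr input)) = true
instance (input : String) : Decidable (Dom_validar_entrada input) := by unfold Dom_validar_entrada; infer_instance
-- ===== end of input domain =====

-- B folds A's three separate scans (isdigit, count('.'), all(...)) into one pass with a counter and two flags; same O(n) cost, different decomposition.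

-- ===== PORT A =====
def validar_entrada (input : String) : Bool :=
  if PySem.Str.strIsdigit input then true
  else if PySem.Str.count input "." == 1
          && input.toList.all (fun ch => PySem.Chars.isdigit ch || ch == '.') then true
  else if input == "" then true
  else false

-- ===== PORT B =====
def validar_entrada_alt (input : String) : Bool :=
  let st : Nat × Bool × Bool :=
    input.toList.foldl
      (fun (s : Nat × Bool × Bool) ch =>
        if ch == '.' then (s.1 + 1, false, s.2.2)
        else if PySem.Chars.isdigit ch then s
        else (s.1, false, false))
      (0, true, true)
  if input == "" then true
  else if st.2.1 then true
  else st.1 == 1 && st.2.2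

-- ===== PRECONDITION & SPEC =====
def Spec_validar_entrada (input : String) (out : Bool) : Prop := out = validar_entrada_alt input
instance (input : String) (out : Bool) : Decidable (Spec_validar_entrada input out) := by unfold Spec_validar_entrada; infer_instance

-- ===== CLAIM (what is proved, stated in full; the proofs are below) =====
def Claim_equal_validar_entrada : Prop := ∀ (input : String), Dom_validar_entrada input → Spec_validar_entrada input (validar_entrada input)

-- ===== LEMMAS AND PROOFS =====

-- The fold computes the '.'-count and the two all-flags relative to the initial state.
theorem pv_fold_char (cs : List Char) (n : Nat) (d o : Bool) :
    cs.foldl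
      (fun (s : Nat × Bool × Bool) ch =>
        if ch == '.' then (s.1 + 1, false, s.2.2)
        else if PySem.Chars.isdigit ch then s
        else (s.1, false, false))
      (n, d, o)
    = (n + cs.count '.',
       d && cs.all PySem.Chars.isdigit,
       o && cs.all (fun ch => PySem.Chars.isdigit ch || ch == '.')) := by
  induction cs generalizing n d o with
  | nil => simp
  | cons c cs ih =>
    rw [List.foldl_cons]
    by_cases hc : c = '.'
    · subst hc
      have hdot : PySem.Chars.isdigit '.' = false := by decide
      simp only [BEq.rfl, if_true, ih]
      simp [hdot]
      omega
    · have hbc : (c == '.') = false := by simp [hc]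
      by_cases hd : PySem.Chars.isdigit c = true
      · simp only [hbc, Bool.false_eq_true, if_false, hd, if_true, ih]
        simp [hc, hd]
      · have hd' : PySem.Chars.isdigit c = false := by simpa using hd
        simp only [hbc, hd', Bool.false_eq_true, if_false, ih]
        simp [hc, hd']

-- Python s.count('.') on a one-char needle is the list count of that char.
theorem pv_count_go_dot (cs : List Char) (fuel acc : Nat) (h : cs.length ≤ fuel) :
    PySem.Chars.count.go ['.'] fuel cs acc = acc + cs.count '.' := by
  induction cs generalizing fuel acc with
  | nil => cases fuel <;> simp [PySem.Chars.count.go]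
  | cons c cs ih =>
    cases fuel with
    | zero => simp at h
    | succ m =>
      simp only [List.length_cons, Nat.succ_le_succ_iff] at h
      by_cases hc : c = '.'
      · subst hc
        rw [PySem.Chars.count.go]
        simp [List.isPrefixOf, ih _ _ h]
        omega
      · rw [PySem.Chars.count.go]
        simp [List.isPrefixOf, hc, Ne.symm hc, ih _ _ h]

theorem pv_count_dot (cs : List Char) : PySem.Chars.count cs ['.'] = cs.count '.' := by
  simp [PySem.Chars.count, pv_count_go_dot cs cs.length 0 le_rfl]

theorem pv_str_empty (s : String) : (s == "") = (s.toList == ([] : List Char)) := by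
  rw [Bool.eq_iff_iff]
  simp [String.toList_eq_nil_iff]

-- ===== VERDICT (by name: the statement is the Claim_ definition above) =====
theorem validar_entrada_spec : Claim_equal_validar_entrada := by
  intro input _
  unfold Spec_validar_entrada validar_entrada validar_entrada_alt
  rw [pv_fold_char]
  rw [PySem.Str.strIsdigit_eq, PySem.Str.count_eq, pv_str_empty]
  have : ("." : String).toList = ['.'] := rfl
  rw [this, pv_count_dot]
  cases h : input.toList with
  | nil => simp [PySem.Chars.strIsdigit]
  | cons c cs =>
    simp only [PySem.Chars.strIsdigit]
    by_cases hall : ((c :: cs).all PySem.Chars.isdigit) = true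
    · simp [hall]
    · simp only [hall]
      rw [Bool.eq_iff_iff]
      simp [List.all_eq_true]
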